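-- pv_equiv track=rewrite | github.com/s3rvac/advent-of-code | 2024/20/aoc20_part2.py | all_pairs_of_free_space_at_most_length_apart
-- ===== SOURCE A (Python) =====
-- TILE_WALL = "#"
--
-- def all_non_wall_tiles(map):
--     for i in range(1, len(map) - 1):
--         for j in range(1, len(map[i]) - 1):
--             if map[i][j] != TILE_WALL:
--                 yield i, j
--
-- def taxicab_distance(i1, j1, i2, j2):
--     # https://en.wikipedia.org/wiki/Taxicab_geometry
--     return abs(i1 - i2) + abs(j1 - j2)
--
-- def all_pairs_of_free_space_at_most_length_apart(map, max_length):
--     # We could just use `itertools.product(all_non_wall_tiles(map), repeat=2)`,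
--     # but the following way is much faster (altough less readable) as it goes
--     # over fewer pairs.
--     for i1, j1 in all_non_wall_tiles(map):
--         for i2 in range(
--             max(1, i1 - max_length - 1), min(i1 + max_length + 1, len(map) - 1)
--         ):
--             for j2 in range(
--                 max(1, j1 - max_length - 1), min(j1 + max_length + 1, len(map[i2]) - 1)
--             ):
--                 if (
--                     map[i2][j2] != TILE_WALL
--                     and taxicab_distance(i1, j1, i2, j2) <= max_length
--                 ):
--                     yield (i1, j1), (i2, j2)
-- ===== SOURCE B (Python) =====
-- TILE_WALL = "#"
--
--
-- def all_pairs_of_free_space_at_most_length_apart(map, max_length):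
--     # Collect interior free tiles with one enumerate-based comprehension, then
--     # build the answer as a list: all ordered pairs passing the taxicab filter.
--     tiles = [
--         (i, j)
--         for i, row in enumerate(map[1:-1], 1)
--         for j, c in enumerate(row[1:-1], 1)
--         if c != TILE_WALL
--     ]
--     return [
--         (t1, t2)
--         for t1 in tiles
--         for t2 in tiles
--         if abs(t1[0] - t2[0]) + abs(t1[1] - t2[1]) <= max_length
--     ]
-- ===== Notes on version B (the rewrite author's own statement) =====
-- stated objective: simpler
-- what changed: B drops A's bounding-box-clamped range loops: it materialises the interior free tiles once via enumerate-based slicing comprehensions and returns the full all-pairs list filtered by taxicab distance.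
import Mathlib
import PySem

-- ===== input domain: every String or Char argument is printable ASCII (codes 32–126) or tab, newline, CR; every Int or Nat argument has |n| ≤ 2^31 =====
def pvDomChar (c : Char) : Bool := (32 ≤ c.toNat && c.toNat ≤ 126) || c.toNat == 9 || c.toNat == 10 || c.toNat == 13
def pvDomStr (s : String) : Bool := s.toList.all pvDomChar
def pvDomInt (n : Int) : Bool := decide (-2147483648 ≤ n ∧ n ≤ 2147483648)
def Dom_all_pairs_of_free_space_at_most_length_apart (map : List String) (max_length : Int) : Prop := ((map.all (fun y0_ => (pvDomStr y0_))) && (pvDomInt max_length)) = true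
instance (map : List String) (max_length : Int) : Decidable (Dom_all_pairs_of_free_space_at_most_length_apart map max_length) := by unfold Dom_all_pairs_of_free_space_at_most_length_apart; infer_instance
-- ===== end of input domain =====

-- B replaces A's bounding-box-clamped range loops by: build the interior free-tile list
-- once via enumerate over sliced rows, then return all ordered pairs passing the
-- taxicab-distance filter; same return value, simpler structure.


-- ===== PORT A =====
-- map[i] as a list of chars; the A port only indexes i with 1 ≤ i < len(map)-1, so the
-- default "" is never used (exact where Python's map[i] returns).
def pvRowChars (map : List String) (i : Int) : List Char :=
  ((PySem.List.pyGet? map i).getD "").toList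

-- map[i][j]; the A port only indexes with 1 ≤ j < len(map[i])-1, so the default is never used.
def pvCharAt (map : List String) (i j : Int) : Char :=
  (PySem.List.pyGet? (pvRowChars map i) j).getD '#'

def all_non_wall_tiles (map : List String) : List (Int × Int) :=
  (PySem.List.pyRange 1 ((map.length : Int) - 1) 1).flatMap (fun i =>
    (PySem.List.pyRange 1 (((pvRowChars map i).length : Int) - 1) 1).flatMap (fun j =>
      if pvCharAt map i j ≠ '#' then [(i, j)] else []))

def taxicab_distance (i1 j1 i2 j2 : Int) : Int := |i1 - i2| + |j1 - j2|

def all_pairs_of_free_space_at_most_length_apart (map : List String) (max_length : Int) : List ((Int × Int) × (Int × Int)) :=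
  (all_non_wall_tiles map).flatMap (fun t1 =>
    (PySem.List.pyRange (max 1 (t1.1 - max_length - 1))
        (min (t1.1 + max_length + 1) ((map.length : Int) - 1)) 1).flatMap (fun i2 =>
      (PySem.List.pyRange (max 1 (t1.2 - max_length - 1))
          (min (t1.2 + max_length + 1) (((pvRowChars map i2).length : Int) - 1)) 1).flatMap (fun j2 =>
        if pvCharAt map i2 j2 ≠ '#' ∧ taxicab_distance t1.1 t1.2 i2 j2 ≤ max_length then
          [(t1, (i2, j2))] else [])))

-- ===== PORT B =====
-- [(i, j) for i, row in enumerate(map[1:-1], 1) for j, c in enumerate(row[1:-1], 1) if c != "#"]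
def pvFreeTiles (map : List String) : List (Int × Int) :=
  (PySem.List.enumerate (PySem.List.slice map (some 1) (some (-1))) 1).flatMap (fun p =>
    (PySem.List.enumerate (PySem.List.slice p.2.toList (some 1) (some (-1))) 1).filterMap (fun q =>
      if q.2 ≠ '#' then some (p.1, q.1) else none))

def all_pairs_of_free_space_at_most_length_apart_alt (map : List String) (max_length : Int) : List ((Int × Int) × (Int × Int)) :=
  let tiles := pvFreeTiles map
  tiles.flatMap (fun t1 =>
    tiles.filterMap (fun t2 =>
      if |t1.1 - t2.1| + |t1.2 - t2.2| ≤ max_length then some (t1, t2) else none))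

-- ===== PRECONDITION & SPEC =====
def Spec_all_pairs_of_free_space_at_most_length_apart (map : List String) (max_length : Int) (out : List ((Int × Int) × (Int × Int))) : Prop := out = all_pairs_of_free_space_at_most_length_apart_alt map max_length
instance (map : List String) (max_length : Int) (out : List ((Int × Int) × (Int × Int))) : Decidable (Spec_all_pairs_of_free_space_at_most_length_apart map max_length out) := by unfold Spec_all_pairs_of_free_space_at_most_length_apart; infer_instance

-- ===== CLAIM (what is proved, stated in full; the proofs are below) =====
def Claim_equal_all_pairs_of_free_space_at_most_length_apart : Prop := ∀ (map : List String) (max_length : Int), Dom_all_pairs_of_free_space_at_most_length_apart map max_length → Spec_all_pairs_of_free_space_at_most_length_apart map max_length (all_pairs_of_free_space_at_most_length_apart map max_length)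

-- ===== LEMMAS AND PROOFS =====

-- flatMap over a range only depends on the points of nonempty image.
lemma pv_flatMap_filter_ne_nil {α β : Type} (l : List α) (f : α → List β) :
    l.flatMap f = (l.filter (fun x => !(f x).isEmpty)).flatMap f := by
  induction l with
  | nil => rfl
  | cons a l ih =>
    by_cases h : (f a).isEmpty
    · have : f a = [] := List.isEmpty_iff.mp h
      simp [List.flatMap_cons, this, ih]
    · simp [List.flatMap_cons, h, ih]

lemma pv_flatMap_pyRange_eq_of_support {β : Type} (a b a' b' : Int) (f : Int → List β)
    (h : ∀ x, f x ≠ [] → ((a ≤ x ∧ x < b) ↔ (a' ≤ x ∧ x < b'))) :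
    (PySem.List.pyRange a b 1).flatMap f = (PySem.List.pyRange a' b' 1).flatMap f := by
  rw [pv_flatMap_filter_ne_nil (PySem.List.pyRange a b 1) f,
      pv_flatMap_filter_ne_nil (PySem.List.pyRange a' b' 1) f]
  have hfilter :
      (PySem.List.pyRange a b 1).filter (fun x => !(f x).isEmpty) =
      (PySem.List.pyRange a' b' 1).filter (fun x => !(f x).isEmpty) := by
    have hs1 : ((PySem.List.pyRange a b 1).filter (fun x => !(f x).isEmpty)).Pairwise (· < ·) :=
      (PySem.List.pairwise_lt_pyRange_one a b).filter _
    have hs2 : ((PySem.List.pyRange a' b' 1).filter (fun x => !(f x).isEmpty)).Pairwise (· < ·) :=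
      (PySem.List.pairwise_lt_pyRange_one a' b').filter _
    have hperm : ((PySem.List.pyRange a b 1).filter (fun x => !(f x).isEmpty)).Perm
        ((PySem.List.pyRange a' b' 1).filter (fun x => !(f x).isEmpty)) := by
      apply List.perm_of_nodup_nodup_toFinset_eq hs1.nodup hs2.nodup
      ext x
      simp only [List.mem_toFinset, List.mem_filter, PySem.List.mem_pyRange_one,
        Bool.not_eq_eq_eq_not, Bool.not_true, List.isEmpty_eq_false_iff]
      constructor
      · rintro ⟨hx, hne⟩; exact ⟨(h x hne).mp hx, hne⟩
      · rintro ⟨hx, hne⟩; exact ⟨(h x hne).mpr hx, hne⟩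
    exact hperm.eq_of_pairwise (fun x y _ _ hxy hyx => absurd hyx (lt_asymm hxy)) hs1 hs2
  rw [hfilter]

lemma pv_flatMap_congr {α β : Type} (l : List α) (f g : α → List β)
    (h : ∀ x, f x = g x) : List.flatMap f l = List.flatMap g l :=
  congrArg (fun f => List.flatMap f l) (funext h)

lemma pv_flatMap_congr_mem {α β : Type} (l : List α) (f g : α → List β)
    (h : ∀ x ∈ l, f x = g x) : l.flatMap f = l.flatMap g := by
  induction l with
  | nil => rfl
  | cons a l ih =>
    simp only [List.flatMap_cons, h a (List.mem_cons_self),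
      ih (fun x hx => h x (List.mem_cons_of_mem a hx))]

-- common "full double scan in row-major order" normal form of A (the bounding box widened)
def pvFull (map : List String) (L : Int) : List ((Int × Int) × (Int × Int)) :=
  (all_non_wall_tiles map).flatMap (fun t1 =>
    (PySem.List.pyRange 1 ((map.length : Int) - 1) 1).flatMap (fun i2 =>
      (PySem.List.pyRange 1 (((pvRowChars map i2).length : Int) - 1) 1).flatMap (fun j2 =>
        if pvCharAt map i2 j2 ≠ '#' ∧ taxicab_distance t1.1 t1.2 i2 j2 ≤ L then
          [(t1, (i2, j2))] else [])))

lemma pv_a_eq_full (map : List String) (L : Int) :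
    all_pairs_of_free_space_at_most_length_apart map L = pvFull map L := by
  unfold all_pairs_of_free_space_at_most_length_apart pvFull
  refine pv_flatMap_congr _ _ _ (fun t1 => ?_)
  obtain ⟨i1, j1⟩ := t1
  have hstep1 : ∀ i2 : Int,
      (PySem.List.pyRange (max 1 (j1 - L - 1))
          (min (j1 + L + 1) (((pvRowChars map i2).length : Int) - 1)) 1).flatMap (fun j2 =>
        if pvCharAt map i2 j2 ≠ '#' ∧ taxicab_distance i1 j1 i2 j2 ≤ L then
          [((i1, j1), (i2, j2))] else []) =
      (PySem.List.pyRange 1 (((pvRowChars map i2).length : Int) - 1) 1).flatMap (fun j2 =>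
        if pvCharAt map i2 j2 ≠ '#' ∧ taxicab_distance i1 j1 i2 j2 ≤ L then
          [((i1, j1), (i2, j2))] else []) := by
    intro i2
    apply pv_flatMap_pyRange_eq_of_support
    intro x hx
    by_cases hc : pvCharAt map i2 x ≠ '#' ∧ taxicab_distance i1 j1 i2 x ≤ L
    · have hd := hc.2
      unfold taxicab_distance at hd
      have h0 : (0 : Int) ≤ |i1 - i2| := abs_nonneg _
      have h1 : j1 - x ≤ |j1 - x| := le_abs_self _
      have h2 : -(j1 - x) ≤ |j1 - x| := neg_le_abs _
      simp only [max_le_iff, lt_min_iff]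
      constructor
      · rintro ⟨⟨hx1, _⟩, _, hx2⟩; exact ⟨hx1, hx2⟩
      · rintro ⟨hx1, hx2⟩
        exact ⟨⟨hx1, by linarith⟩, by linarith, hx2⟩
    · simp [if_neg hc] at hx
  simp only [hstep1]
  apply pv_flatMap_pyRange_eq_of_support
  intro x hx
  rw [Ne, List.flatMap_eq_nil_iff] at hx
  push Not at hx
  obtain ⟨j2, _, hg⟩ := hx
  by_cases hc : pvCharAt map x j2 ≠ '#' ∧ taxicab_distance i1 j1 x j2 ≤ L
  · have hd := hc.2
    unfold taxicab_distance at hd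
    have h0 : (0 : Int) ≤ |j1 - j2| := abs_nonneg _
    have h1 : i1 - x ≤ |i1 - x| := le_abs_self _
    have h2 : -(i1 - x) ≤ |i1 - x| := neg_le_abs _
    simp only [max_le_iff, lt_min_iff]
    constructor
    · rintro ⟨⟨hx1, _⟩, _, hx2⟩; exact ⟨hx1, hx2⟩
    · rintro ⟨hx1, hx2⟩
      exact ⟨⟨hx1, by linarith⟩, by linarith, hx2⟩
  · simp [if_neg hc] at hg

-- the widened A equals the tile-pair double scan
lemma pv_full_eq_pairs (map : List String) (L : Int) :
    pvFull map L = (all_non_wall_tiles map).flatMap (fun t1 =>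
      (all_non_wall_tiles map).flatMap (fun t2 =>
        if taxicab_distance t1.1 t1.2 t2.1 t2.2 ≤ L then [(t1, t2)] else [])) := by
  unfold pvFull
  refine pv_flatMap_congr _ _ _ (fun t1 => ?_)
  conv_rhs => rw [all_non_wall_tiles]
  rw [List.flatMap_assoc]
  refine pv_flatMap_congr _ _ _ (fun i2 => ?_)
  rw [List.flatMap_assoc]
  refine pv_flatMap_congr _ _ _ (fun j2 => ?_)
  by_cases hf : pvCharAt map i2 j2 ≠ '#' <;>
    by_cases hd : taxicab_distance t1.1 t1.2 i2 j2 ≤ L <;>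
      simp [hf, hd]

-- filterMap with an option-valued if is flatMap with a list-valued if
lemma pv_filterMap_if {α β : Type} (l : List α) (c : α → Prop) [DecidablePred c] (f : α → β) :
    l.filterMap (fun x => if c x then some (f x) else none)
      = l.flatMap (fun x => if c x then [f x] else []) := by
  induction l with
  | nil => rfl
  | cons a l ih =>
    by_cases h : c a <;> simp [List.flatMap_cons, h, ih]

-- map[1:-1] is tail+dropLast
lemma pv_slice_one_neg_one {α : Type} (l : List α) :
    PySem.List.slice l (some 1) (some (-1)) = l.tail.dropLast := by
  have h1 : PySem.List.slice l (some 1) (some (-1))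
      = (l.drop (PySem.List.clampIdx l.length 1)).take
          (PySem.List.clampIdx l.length (-1) - PySem.List.clampIdx l.length 1) := rfl
  rw [h1, PySem.List.clampIdx_neg_one]
  have h2 : PySem.List.clampIdx l.length (1 : Int) = min 1 l.length := by
    have h := PySem.List.clampIdx_natCast l.length (1 : Nat)
    simp only [Nat.cast_one] at h
    exact h
  rw [h2]
  cases l with
  | nil => simp
  | cons a t =>
    simp only [List.length_cons, List.tail_cons]
    have hmin : min 1 (t.length + 1) = 1 := by omega
    rw [hmin]
    simp only [List.drop_one, List.tail_cons]
    have : t.length + 1 - 1 - 1 = t.length - 1 := by omega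
    rw [this, ← List.dropLast_eq_take]

-- enumerate over the clipped list = pyRange over interior indices with pyGet? lookup
lemma pv_enum_inner {α β : Type} [Inhabited α] (l : List α) (d : α) (g : Int → α → List β) :
    (PySem.List.enumerate l.tail.dropLast 1).flatMap (fun q => g q.1 q.2)
      = (PySem.List.pyRange 1 ((l.length : Int) - 1) 1).flatMap
          (fun i => g i ((PySem.List.pyGet? l i).getD d)) := by
  set t := l.tail.dropLast with ht
  have hlen : t.length = l.length - 1 - 1 := by
    simp [ht]
  by_cases hsmall : l.length < 2
  · have ht0 : t = [] := by
      apply List.eq_nil_of_length_eq_zero; omega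
    have hr : PySem.List.pyRange 1 ((l.length : Int) - 1) 1 = [] := by
      apply PySem.List.pyRange_one_eq_nil; omega
    simp [ht0, hr, PySem.List.enumerate_nil]
  · have hb : (l.length : Int) - 1 = 1 + (t.length : Int) := by omega
    rw [hb, ← PySem.List.map_fst_enumerate t 1, List.flatMap_map]
    apply pv_flatMap_congr_mem
    intro q hq
    rw [PySem.List.mem_enumerate_iff] at hq
    obtain ⟨k, hk, rfl⟩ := hq
    have hkl : 1 + k < l.length := by omega
    have hidx : (1 : Int) + (k : Int) = ((1 + k : Nat) : Int) := by push_cast; ring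
    have hget : PySem.List.pyGet? l ((1 : Int) + (k : Int)) = some l[1 + k] := by
      rw [hidx, PySem.List.pyGet?_natCast]
      exact List.getElem?_eq_getElem hkl
    have htk : t[k] = l[1 + k] := by
      have h1 : t[k] = l.tail[k]'(by simpa [List.length_dropLast] using by omega) := by
        simp [ht, List.getElem_dropLast]
      rw [h1, List.getElem_tail]
      exact getElem_congr rfl (by omega) (by omega)
    rw [hget]
    simp [htk]

-- B's tile list is A's generator of non-wall tiles
lemma pv_tiles_eq (map : List String) : pvFreeTiles map = all_non_wall_tiles map := by
  unfold pvFreeTiles all_non_wall_tiles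
  rw [pv_slice_one_neg_one]
  have hinner : ∀ p : Int × String,
      ((PySem.List.enumerate (PySem.List.slice p.2.toList (some 1) (some (-1))) 1).filterMap
        (fun q => if q.2 ≠ '#' then some (p.1, q.1) else none))
      = (PySem.List.pyRange 1 ((p.2.toList.length : Int) - 1) 1).flatMap
          (fun j => if (PySem.List.pyGet? p.2.toList j).getD '#' ≠ '#' then [(p.1, j)] else []) := by
    intro p
    rw [pv_filterMap_if _ (fun q : Int × Char => q.2 ≠ '#') (fun q => (p.1, q.1)),
        pv_slice_one_neg_one]
    exact pv_enum_inner p.2.toList '#'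
      (fun j c => if c ≠ '#' then [(p.1, j)] else [])
  have houter :
      (PySem.List.enumerate map.tail.dropLast 1).flatMap (fun p =>
        (PySem.List.pyRange 1 ((p.2.toList.length : Int) - 1) 1).flatMap
          (fun j => if (PySem.List.pyGet? p.2.toList j).getD '#' ≠ '#' then [(p.1, j)] else []))
      = (PySem.List.pyRange 1 ((map.length : Int) - 1) 1).flatMap (fun i =>
          (PySem.List.pyRange 1 (((((PySem.List.pyGet? map i).getD "").toList.length : Int)) - 1) 1).flatMap
            (fun j => if (PySem.List.pyGet? ((PySem.List.pyGet? map i).getD "").toList j).getD '#' ≠ '#'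
              then [(i, j)] else [])) :=
    pv_enum_inner map ""
      (fun i r => (PySem.List.pyRange 1 ((r.toList.length : Int) - 1) 1).flatMap
        (fun j => if (PySem.List.pyGet? r.toList j).getD '#' ≠ '#' then [(i, j)] else []))
  calc (PySem.List.enumerate map.tail.dropLast 1).flatMap (fun p =>
        (PySem.List.enumerate (PySem.List.slice p.2.toList (some 1) (some (-1))) 1).filterMap
          (fun q => if q.2 ≠ '#' then some (p.1, q.1) else none))
      = (PySem.List.enumerate map.tail.dropLast 1).flatMap (fun p =>
        (PySem.List.pyRange 1 ((p.2.toList.length : Int) - 1) 1).flatMap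
          (fun j => if (PySem.List.pyGet? p.2.toList j).getD '#' ≠ '#' then [(p.1, j)] else [])) :=
        pv_flatMap_congr _ _ _ hinner
    _ = _ := by
        rw [houter]
        rfl

theorem all_pairs_of_free_space_at_most_length_apart_spec : Claim_equal_all_pairs_of_free_space_at_most_length_apart := by
  intro map max_length _
  unfold Spec_all_pairs_of_free_space_at_most_length_apart
    all_pairs_of_free_space_at_most_length_apart_alt
  rw [pv_a_eq_full, pv_full_eq_pairs, pv_tiles_eq]
  refine pv_flatMap_congr _ _ _ (fun t1 => ?_)
  rw [pv_filterMap_if _ (fun t2 : Int × Int => |t1.1 - t2.1| + |t1.2 - t2.2| ≤ max_length)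
    (fun t2 => (t1, t2))]
  rfl
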